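-- pv_equiv track=rewrite | github.com/ZzZZCHS/Chat-Scene | preprocess/prepare_scannet_region_caption_annos.py | get_caption
-- ===== SOURCE A (Python) =====
-- from collections import defaultdict
--
-- def get_caption(clean_text, id_positions):
--     p = defaultdict(list)
--     sorted_id_positions_items = [(k, id_positions[k]) for k in sorted(id_positions.keys(), key=int)]
--     for k, v in sorted_id_positions_items:
--         for interval in v:
--             # p[interval[0]].append('[')
--             p[interval[1]].append(f"<OBJ{int(k):03}>")
--     caption = ''
--     for idx in range(len(clean_text)):
--         if idx in p:
--             caption += ' (' + ', '.join(p[idx]) + ')'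
--         caption += clean_text[idx]
--     return caption
-- ===== SOURCE B (Python) =====
-- def get_caption(clean_text, id_positions):
--     pairs = []
--     for k in sorted(id_positions.keys(), key=int):
--         label = "<OBJ%03d>" % int(k)
--         for interval in id_positions[k]:
--             pairs.append((interval[1], label))
--     tags = {}
--     for pos, label in pairs:
--         tags.setdefault(pos, []).append(label)
--     n = len(clean_text)
--     positions = sorted(pos for pos in tags if 0 <= pos < n)
--     out = []
--     prev = 0
--     for pos in positions:
--         out.append(clean_text[prev:pos])
--         out.append(' (' + ', '.join(tags[pos]) + ')')
--         prev = pos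
--     out.append(clean_text[prev:])
--     return ''.join(out)
-- ===== Notes on version B (the rewrite author's own statement) =====
-- stated objective: simpler
-- what changed: B replaces A's per-character scan with a membership test at every index by slicing the text at the sorted in-range insertion positions and joining the segments (positions collected once as a flat (position, tag) pair list).
import Mathlib
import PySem

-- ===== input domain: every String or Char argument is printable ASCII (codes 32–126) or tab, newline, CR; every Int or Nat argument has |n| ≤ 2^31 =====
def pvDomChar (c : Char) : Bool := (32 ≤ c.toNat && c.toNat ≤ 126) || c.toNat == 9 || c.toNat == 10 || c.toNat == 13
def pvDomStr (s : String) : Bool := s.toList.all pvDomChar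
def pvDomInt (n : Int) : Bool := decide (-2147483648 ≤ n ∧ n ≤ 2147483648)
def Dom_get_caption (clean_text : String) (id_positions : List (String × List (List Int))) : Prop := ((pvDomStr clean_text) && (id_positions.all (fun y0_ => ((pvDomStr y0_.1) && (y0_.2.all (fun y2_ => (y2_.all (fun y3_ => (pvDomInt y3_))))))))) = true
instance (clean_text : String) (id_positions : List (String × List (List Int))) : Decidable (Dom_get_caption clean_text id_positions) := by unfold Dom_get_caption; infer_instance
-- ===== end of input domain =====

-- B re-implements A by slicing the text at the sorted in-range insertion positions instead of
-- scanning every character with a membership test; return values agree on Pre_ (objective: simpler).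

-- ===== PORT A =====
-- shared helper: the f-string  f"<OBJ{int(k):03}>"  (identical line in both Pythons)
def pvFmt03 (n : Int) : List Char :=
  if n < 0 then '-' :: (List.replicate (2 - (PySem.Int.toChars (-n)).length) '0' ++ PySem.Int.toChars (-n))
  else List.replicate (3 - (PySem.Int.toChars n).length) '0' ++ PySem.Int.toChars n

def pvObjTag (k : String) : List Char :=
  "<OBJ".toList ++ pvFmt03 ((PySem.Int.ofStr? k).getD 0) ++ ">".toList

def get_caption (clean_text : String) (id_positions : List (String × List (List Int))) : String :=
  let d := PySem.Dict.ofList id_positions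
  let sorted_id_positions_items :=
    (PySem.List.sorted d.keys (fun k => (PySem.Int.ofStr? k).getD 0)).map (fun k => (k, d.getD k []))
  let p := sorted_id_positions_items.foldl
    (fun p kv => kv.2.foldl
      (fun p interval =>
        p.modify ((PySem.List.pyGet? interval 1).getD 0) [] (fun l => l ++ [pvObjTag kv.1])) p)
    PySem.Dict.empty
  let caption := (PySem.List.pyRange 0 (clean_text.toList.length : Int)).foldl
    (fun cap idx =>
      let cap := if p.contains idx then
          cap ++ (" (".toList ++ PySem.Chars.join ", ".toList (p.getD idx []) ++ ")".toList)
        else cap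
      cap ++ [(PySem.List.pyGet? clean_text.toList idx).getD ' ']) []
  String.ofList caption

-- ===== PORT B =====
def get_caption_alt (clean_text : String) (id_positions : List (String × List (List Int))) : String :=
  let d := PySem.Dict.ofList id_positions
  let pairs := (PySem.List.sorted d.keys (fun k => (PySem.Int.ofStr? k).getD 0)).flatMap
    (fun k => (d.getD k []).map
      (fun interval => ((PySem.List.pyGet? interval 1).getD 0, pvObjTag k)))
  let tags := pairs.foldl (fun t pr => t.modify pr.1 [] (fun l => l ++ [pr.2])) PySem.Dict.empty
  let cs := clean_text.toList
  let positions := PySem.List.sorted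
    (tags.keys.filter (fun q => decide (0 ≤ q ∧ q < (cs.length : Int)))) (fun q => q)
  let st := positions.foldl
    (fun st pos => (pos, st.2 ++
      [PySem.List.slice cs (some st.1) (some pos),
       " (".toList ++ PySem.Chars.join ", ".toList (tags.getD pos []) ++ ")".toList]))
    ((0 : Int), ([] : List (List Char)))
  String.ofList ((st.2 ++ [PySem.List.slice cs (some st.1) none]).flatten)

-- ===== PRECONDITION & SPEC =====
-- Pre_ excludes exactly the inputs where A raises: a dict key int(k) cannot parse (ValueError),
-- or an effective interval has fewer than 2 elements (IndexError on interval[1]).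
def Pre_get_caption (clean_text : String) (id_positions : List (String × List (List Int))) : Prop :=
  ∀ kv ∈ (PySem.Dict.ofList id_positions).items,
    (PySem.Int.ofStr? kv.1).isSome = true ∧ ∀ iv ∈ kv.2, 2 ≤ iv.length
instance (clean_text : String) (id_positions : List (String × List (List Int))) : Decidable (Pre_get_caption clean_text id_positions) := by unfold Pre_get_caption; infer_instance

def pvWitness_get_caption : String × (List (String × List (List Int))) := ("ab", [("3", [[0, 1]])])

def Spec_get_caption (clean_text : String) (id_positions : List (String × List (List Int))) (out : String) : Prop := out = get_caption_alt clean_text id_positions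
instance (clean_text : String) (id_positions : List (String × List (List Int))) (out : String) : Decidable (Spec_get_caption clean_text id_positions out) := by unfold Spec_get_caption; infer_instance

-- ===== CLAIM (what is proved, stated in full; the proofs are below) =====
def Claim_equal_get_caption : Prop := ∀ (clean_text : String) (id_positions : List (String × List (List Int))), Dom_get_caption clean_text id_positions → Pre_get_caption clean_text id_positions → Spec_get_caption clean_text id_positions (get_caption clean_text id_positions)

-- ===== LEMMAS AND PROOFS =====

-- B's segment assembly, written as a recursion on the list of marked positions.
def pvSeg (cs : List Char) (T : Int → List Char) : Int → List Int → List Char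
  | prev, [] => PySem.List.slice cs (some prev) none
  | prev, q :: qs => PySem.List.slice cs (some prev) (some q) ++ T q ++ pvSeg cs T q qs

-- A's nested grouping loop equals B's fold over the flattened (position, tag) pair list.
lemma pv_nested_foldl (l : List (String × List (List Int))) (d0 : PySem.Dict Int (List (List Char))) :
    l.foldl (fun p kv => kv.2.foldl
      (fun p interval =>
        p.modify ((PySem.List.pyGet? interval 1).getD 0) [] (fun s => s ++ [pvObjTag kv.1])) p) d0
    = (l.flatMap (fun kv => kv.2.map
        (fun interval => ((PySem.List.pyGet? interval 1).getD 0, pvObjTag kv.1)))).foldl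
        (fun t pr => t.modify pr.1 [] (fun s => s ++ [pr.2])) d0 := by
  induction l generalizing d0 with
  | nil => rfl
  | cons kv rest ih =>
    simp only [List.foldl_cons, List.flatMap_cons, List.foldl_append, List.foldl_map, ih]

-- A's character loop equals a flatMap over the index range.
lemma pv_foldl_if_append (l : List Int) (c : Int → Bool) (t : Int → List Char)
    (g : Int → Char) (init : List Char) :
    l.foldl (fun cap idx => (if c idx then cap ++ t idx else cap) ++ [g idx]) init
    = init ++ l.flatMap (fun idx => (if c idx then t idx else []) ++ [g idx]) := by
  induction l generalizing init with
  | nil => simp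
  | cons a rest ih =>
    simp only [List.foldl_cons, List.flatMap_cons, ih]
    by_cases h : c a = true <;> simp [h]

-- B's foldl over positions computes pvSeg.
lemma pv_bfold (cs : List Char) (T : Int → List Char) (qs : List Int) :
    ∀ (prev : Int) (acc : List (List Char)),
    ((qs.foldl
        (fun st pos => (pos, st.2 ++ [PySem.List.slice cs (some st.1) (some pos), T pos]))
        (prev, acc)).2
      ++ [PySem.List.slice cs
          (some (qs.foldl
            (fun st pos => (pos, st.2 ++ [PySem.List.slice cs (some st.1) (some pos), T pos]))
            (prev, acc)).1) none]).flatten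
    = acc.flatten ++ pvSeg cs T prev qs := by
  induction qs with
  | nil => intro prev acc; simp [pvSeg]
  | cons q rest ih =>
    intro prev acc
    simp only [List.foldl_cons]
    rw [ih q (acc ++ [PySem.List.slice cs (some prev) (some q), T q])]
    simp [pvSeg]

-- take of a drop as a flatMap of singleton characters over the index range.
lemma pv_take_drop_flatMap (cs : List Char) (k : Nat) :
    ∀ (a : Nat), a + k ≤ cs.length →
    (cs.drop a).take k
      = ((List.range' a k).map (fun i : Nat => (i : Int))).flatMap
          (fun j => [(PySem.List.pyGet? cs j).getD ' ']) := by
  induction k with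
  | zero => intro a _; simp
  | succ k ih =>
    intro a h
    have ha : a < cs.length := by omega
    rw [List.drop_eq_getElem_cons ha, List.range'_succ]
    simp only [List.take_succ_cons, List.map_cons, List.flatMap_cons,
      PySem.List.pyGet?_natCast, List.getElem?_eq_getElem ha]
    rw [ih (a + 1) (by omega)]
    rfl

-- core: the segment assembly over sorted in-range positions equals the per-index flatMap.
lemma pv_seg_eq (cs : List Char) (T : Int → List Char) (qs : List Int) :
    ∀ (a : Nat), qs.Pairwise (· < ·) →
    (∀ q ∈ qs, (a : Int) ≤ q ∧ q < (cs.length : Int)) →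
    pvSeg cs T (a : Int) qs
      = ((List.range' a (cs.length - a)).map (fun i : Nat => (i : Int))).flatMap
          (fun j => (if j ∈ qs then T j else [])
            ++ [(PySem.List.pyGet? cs j).getD ' ']) := by
  induction qs with
  | nil =>
    intro a _ _
    simp only [pvSeg]
    rw [PySem.List.slice_from cs (by exact_mod_cast Int.natCast_nonneg a)]
    rw [Int.toNat_natCast]
    rcases le_or_gt a cs.length with hle | hgt
    · have h1 : cs.drop a = (cs.drop a).take (cs.length - a) := by
        rw [← List.length_drop (l := cs) (i := a), List.take_length]
      rw [h1, pv_take_drop_flatMap cs (cs.length - a) a (by omega)]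
      simp
    · have h0 : cs.length - a = 0 := by omega
      rw [h0, List.drop_eq_nil_of_le (le_of_lt hgt)]
      simp
  | cons q rest ih =>
    intro a hp hb
    obtain ⟨haq, hqlen⟩ := hb q List.mem_cons_self
    have hq0 : (0 : Int) ≤ q := le_trans (Int.natCast_nonneg a) haq
    have hqcast : ((q.toNat : Nat) : Int) = q := Int.toNat_of_nonneg hq0
    have haqn : a ≤ q.toNat := by
      have := haq; rw [← hqcast] at this; exact_mod_cast this
    have hqlen' : q.toNat < cs.length := by
      have := hqlen; rw [← hqcast] at this; exact_mod_cast this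
    have hrest : ∀ x ∈ rest, ((q.toNat : Nat) : Int) ≤ x ∧ x < (cs.length : Int) := by
      intro x hx
      refine ⟨?_, (hb x (List.mem_cons_of_mem _ hx)).2⟩
      rw [hqcast]
      exact le_of_lt (List.rel_of_pairwise_cons hp hx)
    have hIH := ih q.toNat hp.of_cons hrest
    -- split the index range at q
    have hsplit : List.range' a (cs.length - a)
        = List.range' a (q.toNat - a) ++ List.range' q.toNat (cs.length - q.toNat) := by
      have h1 : a + 1 * (q.toNat - a) = q.toNat := by omega
      have h2 : (q.toNat - a) + (cs.length - q.toNat) = cs.length - a := by omega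
      rw [← h2, ← List.range'_append, h1]
    have hsucc : cs.length - q.toNat = (cs.length - q.toNat - 1) + 1 := by omega
    -- first chunk: no marked position below q
    have hchunk1 : ∀ x ∈ (List.range' a (q.toNat - a)).map (fun i : Nat => (i : Int)),
        ((if x ∈ q :: rest then T x else [])
          ++ [(PySem.List.pyGet? cs x).getD ' ']) = [(PySem.List.pyGet? cs x).getD ' '] := by
      intro x hx
      obtain ⟨i, hi, rfl⟩ := List.mem_map.mp hx
      have hilt : i < q.toNat := (List.mem_range'_1.mp hi).2.trans_le (by omega)
      have : ¬ ((i : Int) ∈ q :: rest) := by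
        intro hmem
        rcases List.mem_cons.mp hmem with h | h
        · omega
        · have := List.rel_of_pairwise_cons hp h
          omega
      simp [this]
    -- tail chunk: indices above q see the same condition in q :: rest and rest
    have hchunk2 : ∀ x ∈ (List.range' (q.toNat + 1) (cs.length - q.toNat - 1)).map (fun i : Nat => (i : Int)),
        ((if x ∈ q :: rest then T x else []) ++ [(PySem.List.pyGet? cs x).getD ' '])
          = ((if x ∈ rest then T x else []) ++ [(PySem.List.pyGet? cs x).getD ' ']) := by
      intro x hx
      obtain ⟨i, hi, rfl⟩ := List.mem_map.mp hx
      have higt : q.toNat + 1 ≤ i := (List.mem_range'_1.mp hi).1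
      have hne : (i : Int) ≠ q := by omega
      simp [List.mem_cons, hne]
    have hqnotrest : ¬ ((q : Int) ∈ rest) := by
      intro h
      exact absurd (List.rel_of_pairwise_cons hp h) (lt_irrefl q)
    have hIH' : pvSeg cs T q rest
        = List.flatMap (fun j => (if j ∈ rest then T j else []) ++ [(PySem.List.pyGet? cs j).getD ' '])
          (List.map (fun i : Nat => (i : Int)) (List.range' q.toNat (cs.length - q.toNat))) := by
      rw [← hqcast]; exact hIH
    have hslice : PySem.List.slice cs (some (a : Int)) (some q)
        = (cs.drop a).take (q.toNat - a) := by
      rw [← hqcast, PySem.List.slice_natCast, Int.toNat_natCast]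
    simp only [pvSeg]
    rw [hslice, pv_take_drop_flatMap cs (q.toNat - a) a (by omega), hIH']
    rw [hsplit, List.map_append, List.flatMap_append]
    rw [List.flatMap_congr hchunk1]
    conv_rhs => rw [hsucc, List.range'_succ, List.map_cons, List.flatMap_cons]
    conv_lhs => rw [hsucc, List.range'_succ, List.map_cons, List.flatMap_cons]
    rw [List.flatMap_congr hchunk2]
    rw [hqcast]
    simp [hqnotrest, List.append_assoc]

-- ===== VERDICT (by name: the statement is the Claim_ definition above) =====
lemma pv_pairwise_lt (l : List Int) (h1 : l.Pairwise (· ≤ ·)) (h2 : l.Nodup) :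
    l.Pairwise (· < ·) :=
  (h1.and h2).imp (fun h => lt_of_le_of_ne h.1 h.2)

lemma pv_seg_eq0 (cs : List Char) (T : Int → List Char) (qs : List Int)
    (hp : qs.Pairwise (· < ·)) (hb : ∀ q ∈ qs, (0 : Int) ≤ q ∧ q < (cs.length : Int)) :
    pvSeg cs T 0 qs
      = ((List.range' 0 cs.length).map (fun i : Nat => (i : Int))).flatMap
          (fun j => (if j ∈ qs then T j else [])
            ++ [(PySem.List.pyGet? cs j).getD ' ']) := by
  have h := pv_seg_eq cs T qs 0 hp (by simpa using hb)
  simpa using h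

-- the whole assembly argument, for an arbitrary grouping dict P with distinct keys
lemma pv_main (cs : List Char) (P : PySem.Dict Int (List (List Char))) (hnd : P.keys.Nodup) :
    String.ofList ([] ++ (PySem.List.pyRange 0 (cs.length : Int)).flatMap
      (fun idx => (if P.contains idx = true then
          " (".toList ++ PySem.Chars.join ", ".toList (P.getD idx []) ++ ")".toList
        else []) ++ [(PySem.List.pyGet? cs idx).getD ' ']))
    = String.ofList (([] : List (List Char)).flatten ++ pvSeg cs
        (fun pos => " (".toList ++ PySem.Chars.join ", ".toList (P.getD pos []) ++ ")".toList)
        (0 : Int)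
        (PySem.List.sorted
          (P.keys.filter (fun q => decide (0 ≤ q ∧ q < (cs.length : Int)))) (fun q => q))) := by
  apply congrArg
  have hperm := PySem.List.sorted_perm
    (P.keys.filter (fun q => decide (0 ≤ q ∧ q < (cs.length : Int)))) (fun q : Int => q) false
  have hnodup : (PySem.List.sorted
      (P.keys.filter (fun q => decide (0 ≤ q ∧ q < (cs.length : Int)))) (fun q : Int => q)).Nodup :=
    hperm.nodup_iff.mpr (hnd.filter _)
  have hpair := pv_pairwise_lt _
    (PySem.List.sorted_pairwise
      (P.keys.filter (fun q => decide (0 ≤ q ∧ q < (cs.length : Int)))) (fun q : Int => q)) hnodup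
  have hbnd : ∀ q ∈ PySem.List.sorted
      (P.keys.filter (fun q => decide (0 ≤ q ∧ q < (cs.length : Int)))) (fun q : Int => q),
      (0 : Int) ≤ q ∧ q < (cs.length : Int) := by
    intro q hq
    rw [PySem.List.mem_sorted] at hq
    have := (List.mem_filter.mp hq).2
    exact of_decide_eq_true this
  rw [pv_seg_eq0 cs _ _ hpair hbnd, PySem.List.pyRange_zero_natCast, List.range_eq_range']
  simp only [List.nil_append, List.flatten_nil]
  apply List.flatMap_congr
  intro x hx
  obtain ⟨i, hi, rfl⟩ := List.mem_map.mp hx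
  have hilt : i < cs.length := by
    have := List.mem_range'_1.mp hi
    omega
  have hmem : (P.contains (i : Int) = true)
      ↔ (i : Int) ∈ PySem.List.sorted
          (P.keys.filter (fun q => decide (0 ≤ q ∧ q < (cs.length : Int)))) (fun q : Int => q) := by
    rw [PySem.Dict.contains_iff_mem_keys, PySem.List.mem_sorted, List.mem_filter]
    constructor
    · intro h
      refine ⟨h, by simp; omega⟩
    · intro h
      exact h.1
  by_cases h : P.contains (i : Int) = true
  · rw [if_pos h, if_pos (hmem.mp h)]
  · rw [if_neg h, if_neg (fun hm => h (hmem.mpr hm))]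

theorem get_caption_spec : Claim_equal_get_caption := by
  intro ct idp _ _
  unfold Spec_get_caption
  simp only [get_caption, get_caption_alt, pv_nested_foldl, List.flatMap_map]
  rw [pv_foldl_if_append, pv_bfold]
  exact pv_main ct.toList _
    (PySem.Dict.nodup_keys_foldl_modify_key _ (fun pr : Int × List Char => pr.1) []
      (fun _ (pr : Int × List Char) => fun s => s ++ [pr.2]) PySem.Dict.empty
      PySem.Dict.nodup_keys_empty)
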